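-- pv_equiv track=rewrite | github.com/mooojn/UET | Study-Material/Semester-3/Data Structures and Algorithms LAB/Lab01/funcs.py | Sort10
-- ===== SOURCE A (Python) =====
-- def Sort10(Arr):
--     negatives = sorted([x for x in Arr if x < 0])
--     positives = sorted([x for x in Arr if x >= 0])
--     result = []
--     i, j = 0, 0
--     while i < len(negatives) and j < len(positives):
--         result.append(negatives[i])
--         result.append(positives[j])
--         i += 1
--         j += 1
--     while i < len(negatives):
--         result.append(negatives[i])
--         i += 1
--     while j < len(positives):
--         result.append(positives[j])
--         j += 1
--     return result
-- ===== SOURCE B (Python) =====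
-- def Sort10(Arr):
--     def weave(a, b):
--         if not a or not b:
--             return a + b
--         return [a[0], b[0]] + weave(a[1:], b[1:])
--     s = sorted(Arr)
--     k = sum(1 for x in s if x < 0)
--     return weave(s[:k], s[k:])
-- ===== Notes on version B (the rewrite author's own statement) =====
-- stated objective: alternative
-- what changed: Sorts the whole array ONCE (instead of two separate sorts of the sign classes), splits the sorted array at the negative/non-negative boundary by counting negatives, and interleaves the two halves with a recursive weave instead of three index-based while loops.
import Mathlib
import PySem

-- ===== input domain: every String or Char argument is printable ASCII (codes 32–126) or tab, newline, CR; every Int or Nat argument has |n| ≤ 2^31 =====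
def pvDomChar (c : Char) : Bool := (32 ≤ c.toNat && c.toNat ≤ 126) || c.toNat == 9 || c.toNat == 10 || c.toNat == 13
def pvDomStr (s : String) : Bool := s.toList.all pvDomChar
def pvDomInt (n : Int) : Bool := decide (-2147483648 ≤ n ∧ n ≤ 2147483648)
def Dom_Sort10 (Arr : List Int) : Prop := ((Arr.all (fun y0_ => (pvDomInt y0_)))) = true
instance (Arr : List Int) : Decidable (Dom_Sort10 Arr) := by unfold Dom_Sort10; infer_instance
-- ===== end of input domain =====

-- B sorts the whole array once, splits it at the negative/non-negative boundary by counting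
-- negatives, and interleaves the two halves with a recursive weave (objective: alternative).

-- ===== PORT A =====
-- first while loop: both indices advance together (they start equal and stay equal, so one index argument i = j)
def sortAloopBoth (n p : List Int) (i : Nat) (res : List Int) : List Int × Nat :=
  if h : i < n.length ∧ i < p.length then
    sortAloopBoth n p (i + 1) (res ++ [n[i], p[i]])
  else (res, i)
termination_by n.length - i
decreasing_by omega

-- second/third while loop: append l[i], l[i+1], … to res
def sortAloopRest (l : List Int) (i : Nat) (res : List Int) : List Int :=
  if h : i < l.length then
    sortAloopRest l (i + 1) (res ++ [l[i]])
  else res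
termination_by l.length - i
decreasing_by omega

def Sort10 (Arr : List Int) : List Int :=
  let negatives := PySem.List.sorted (Arr.filter (fun x => x < 0)) (fun x => x)
  let positives := PySem.List.sorted (Arr.filter (fun x => x ≥ 0)) (fun x => x)
  let r1 := sortAloopBoth negatives positives 0 []
  let r2 := sortAloopRest negatives r1.2 r1.1
  sortAloopRest positives r1.2 r2

-- ===== PORT B =====
-- weave(a, b): 'if not a or not b: return a + b' else '[a[0], b[0]] + weave(a[1:], b[1:])'
def weave : List Int → List Int → List Int
  | [], b => [] ++ b
  | a :: as, [] => (a :: as) ++ []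
  | a :: as, b :: bs => [a, b] ++ weave as bs

def Sort10_alt (Arr : List Int) : List Int :=
  let s := PySem.List.sorted Arr (fun x => x)
  -- k = sum(1 for x in s if x < 0)
  let k := s.countP (fun x => decide (x < 0))
  -- s[:k], s[k:] with 0 ≤ k ≤ len(s): take/drop are exact here
  weave (s.take k) (s.drop k)

-- ===== PRECONDITION & SPEC =====
def Spec_Sort10 (Arr : List Int) (out : List Int) : Prop := out = Sort10_alt Arr
instance (Arr : List Int) (out : List Int) : Decidable (Spec_Sort10 Arr out) := by unfold Spec_Sort10; infer_instance

-- ===== CLAIM =====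
def Claim_equal_Sort10 : Prop := ∀ (Arr : List Int), Dom_Sort10 Arr → Spec_Sort10 Arr (Sort10 Arr)

-- ===== LEMMAS AND PROOFS =====

lemma sortAloopRest_eq (l : List Int) : ∀ (i : Nat) (res : List Int),
    sortAloopRest l i res = res ++ l.drop i := by
  intro i
  induction hm : l.length - i using Nat.strong_induction_on generalizing i with
  | _ m ih =>
    intro res
    rw [sortAloopRest]
    split
    · next h =>
      rw [ih (l.length - (i+1)) (by omega) (i+1) rfl _]
      rw [List.drop_eq_getElem_cons h]
      simp
    · next h =>
      rw [List.drop_of_length_le (by omega)]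
      simp

lemma sortAloopBoth_eq (n p : List Int) : ∀ (i : Nat) (res : List Int),
    i ≤ min n.length p.length →
    sortAloopBoth n p i res =
      (res ++ ((n.zip p).drop i).flatMap (fun q => [q.1, q.2]), min n.length p.length) := by
  intro i
  induction hm : n.length - i using Nat.strong_induction_on generalizing i with
  | _ m ih =>
    intro res hle
    rw [sortAloopBoth]
    split
    · next h =>
      rw [ih (n.length - (i+1)) (by omega) (i+1) rfl _ (by omega)]
      have hz : i < (n.zip p).length := by simp [List.length_zip]; omega
      rw [List.drop_eq_getElem_cons hz]
      simp
    · next h =>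
      have : min n.length p.length = i := by omega
      rw [this, List.drop_of_length_le (by simp [List.length_zip]; omega)]
      simp

-- weave produces the interleaved common prefix followed by the longer list's tail
lemma weave_eq : ∀ (a b : List Int),
    weave a b = (a.zip b).flatMap (fun q => [q.1, q.2])
      ++ a.drop (min a.length b.length) ++ b.drop (min a.length b.length) := by
  intro a
  induction a with
  | nil => intro b; simp [weave]
  | cons x xs ih =>
    intro b
    cases b with
    | nil => simp [weave]
    | cons y ys => simp [weave, ih ys, Nat.succ_min_succ]

-- one sort of the whole array = sorted negatives followed by sorted non-negatives
lemma sorted_split (Arr : List Int) :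
    PySem.List.sorted Arr (fun x => x) =
      PySem.List.sorted (Arr.filter (fun x => x < 0)) (fun x => x)
        ++ PySem.List.sorted (Arr.filter (fun x => x ≥ 0)) (fun x => x) := by
  set n := PySem.List.sorted (Arr.filter (fun x => x < 0)) (fun x => x) with hn
  set p := PySem.List.sorted (Arr.filter (fun x => x ≥ 0)) (fun x => x) with hp
  have hmn : ∀ x ∈ n, x < 0 := by
    intro x hx
    have := (PySem.List.mem_sorted (xs := Arr.filter (fun x => x < 0))
      (key := fun x => x) (rev := false) (x := x)).1 hx
    simpa using (List.of_mem_filter this)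
  have hmp : ∀ x ∈ p, 0 ≤ x := by
    intro x hx
    have := (PySem.List.mem_sorted (xs := Arr.filter (fun x => x ≥ 0))
      (key := fun x => x) (rev := false) (x := x)).1 hx
    simpa using (List.of_mem_filter this)
  apply PySem.List.sorted_id_eq_of_perm_of_pairwise
  · -- permutation with Arr
    have h2 : Arr.filter (fun x => decide (x ≥ 0)) =
        Arr.filter (fun x => !decide (x < 0)) := by
      apply List.filter_congr
      intro x _
      by_cases h : x < 0 <;> simp [h] <;> omega
    have hstep : (n ++ p).Perm
        (Arr.filter (fun x => decide (x < 0)) ++ Arr.filter (fun x => decide (x ≥ 0))) :=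
      (PySem.List.sorted_perm _ _ _).append (PySem.List.sorted_perm _ _ _)
    exact hstep.trans (by rw [h2]; exact List.filter_append_perm _ Arr)
  · -- pairwise ≤
    rw [List.pairwise_append]
    refine ⟨?_, ?_, ?_⟩
    · have := PySem.List.sorted_pairwise (xs := Arr.filter (fun x => x < 0)) (key := fun x => x)
      simpa using this
    · have := PySem.List.sorted_pairwise (xs := Arr.filter (fun x => x ≥ 0)) (key := fun x => x)
      simpa using this
    · intro a ha b hb
      have := hmn a ha; have := hmp b hb; omega

-- ===== VERDICT =====
theorem Sort10_spec : Claim_equal_Sort10 := by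
  intro Arr _
  show Sort10 Arr = Sort10_alt Arr
  unfold Sort10 Sort10_alt
  dsimp only
  set n := PySem.List.sorted (Arr.filter (fun x => x < 0)) (fun x => x) with hn
  set p := PySem.List.sorted (Arr.filter (fun x => x ≥ 0)) (fun x => x) with hp
  have hmn : ∀ x ∈ n, x < 0 := by
    intro x hx
    have := (PySem.List.mem_sorted (xs := Arr.filter (fun x => x < 0))
      (key := fun x => x) (rev := false) (x := x)).1 hx
    simpa using (List.of_mem_filter this)
  have hmp : ∀ x ∈ p, 0 ≤ x := by
    intro x hx
    have := (PySem.List.mem_sorted (xs := Arr.filter (fun x => x ≥ 0))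
      (key := fun x => x) (rev := false) (x := x)).1 hx
    simpa using (List.of_mem_filter this)
  have hsplit : PySem.List.sorted Arr (fun x => x) = n ++ p := sorted_split Arr
  have hk : (n ++ p).countP (fun x => decide (x < 0)) = n.length := by
    rw [List.countP_append]
    have h1 : n.countP (fun x => decide (x < 0)) = n.length :=
      List.countP_eq_length.2 (by intro x hx; simpa using hmn x hx)
    have h2 : p.countP (fun x => decide (x < 0)) = 0 :=
      List.countP_eq_zero.2 (by intro x hx; have := hmp x hx; simpa using (by omega : ¬ x < 0))
    omega
  rw [hsplit, hk, List.take_left, List.drop_left, weave_eq,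
    sortAloopBoth_eq n p 0 [] (by omega)]
  simp only [sortAloopRest_eq, List.drop_zero, List.nil_append, List.append_assoc]
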